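-- pv_equiv track=rewrite | github.com/awaisamjad/quantcast | main.py | sort_data_as_date_to_cookies
-- ===== SOURCE A (Python) =====
-- def sort_data_as_date_to_cookies(data: str) -> dict[str, list]:
--     data_split = data.split("\n") #~ Separate the data by line breaks and store it in a list
--     #& Example:
--     #& data = """cookie,timestamp
--     #& AtY0laUfhglK3lC7,2018-12-09T14:19:00+00:00
--     #& SAZuXPGUrfbcn5UA,2018-12-09T10:13:00+00:00
--     #& SAZuXPGUrfbcn5UA,2018-12-09T11:13:00+00:00"""
--     #& data_split = ["cookie,timestamp", "AtY0laUfhglK3lC7,2018-12-09T14:19:00+00:00", "SAZuXPGUrfbcn5UA,2018-12-09T10:13:00+00:00", "SAZuXPGUrfbcn5UA,2018-12-09T11:13:00+00:00"]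
--
--     #~ dictionary/hashmap to store the data with key: date and value: list of cookies
--     log = {}
--
--     #~ Iterate over the data_split list starting from the second element as this removes the header
--     #TODO
--     #! Another approach -> The header might have to be removed at the start via data_split.pop(0)
--
--     for i in range(1, len(data_split)):
--
--         #~ Separate the cookie and timestamp by comma
--         #& Example: AtY0laUfhglK3lC7,2018-12-09T14:19:00+00:00 ->
--         #& cookie : AtY0laUfhglK3lC7 timestamp : 2018-12-09T14:19:00+00:00
--         cookie, timestamp  = data_split[i].split(",")
--
--         #~ Split the timestamp by T and get the date which is the first element
--         #& Example: 2018-12-09T14:19:00+00:00 -> 2018-12-09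
--         date = timestamp.split("T")[0]
--
--         #~ Check if the date is already in the dictionary
--         #~ If it is, then append the cookie to the list of cookies
--         #~ If not, then create a new key with the date and store the cookie as a list
--         #? This ensures that there are no duplicate dates and that each date has all its respective cookies
--         #? At the start we have no dates so all unique dates will be added to the dictionary
--         #? Then when a repeated date is found, the cookie will be appended to the list of cookies instead of added as a new key
--         if date in log:
--             log[date].append(cookie)
--         else:
--             log[date] = [cookie]
--
--     return log
-- ===== SOURCE B (Python) =====
-- def sort_data_as_date_to_cookies(data: str) -> dict[str, list]:
--     # Different decomposition: parse all lines into (date, cookie) pairs first,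
--     # then build the result from the distinct dates with a per-date filter pass.
--     rows = [line.split(",") for line in data.split("\n")[1:]]
--     pairs = [(timestamp.split("T")[0], cookie) for cookie, timestamp in rows]
--     dates = list(dict.fromkeys(date for date, _ in pairs))
--     return {date: [c for d, c in pairs if d == date] for date in dates}
-- ===== Notes on version B (the rewrite author's own statement) =====
-- stated objective: alternative
-- what changed: Replaces A's single incremental dict-membership scan with a parse-all-pairs pass followed by a distinct-dates pass that gathers each date's cookies by filtering the pair list.
import Mathlib
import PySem

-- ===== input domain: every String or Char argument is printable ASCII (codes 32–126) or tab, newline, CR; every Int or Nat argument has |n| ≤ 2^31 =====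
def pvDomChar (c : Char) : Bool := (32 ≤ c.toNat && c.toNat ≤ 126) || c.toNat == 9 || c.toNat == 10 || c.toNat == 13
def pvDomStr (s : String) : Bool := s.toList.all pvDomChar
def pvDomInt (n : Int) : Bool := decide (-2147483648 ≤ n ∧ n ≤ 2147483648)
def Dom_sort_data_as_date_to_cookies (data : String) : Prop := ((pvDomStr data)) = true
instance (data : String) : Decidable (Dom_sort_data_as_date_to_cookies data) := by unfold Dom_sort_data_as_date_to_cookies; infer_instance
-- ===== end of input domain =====

-- B replaces A's incremental dict-membership scan by a parse-all-pairs pass then a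
-- distinct-dates pass filtering the pair list; equal on inputs where A returns (Pre_).

-- s.split(sep) for a non-empty literal sep (exact: Str.split? is none only for sep = "")
def pySplit (s sep : String) : List String := (PySem.Str.split? s sep).getD [s]

-- ===== PORT A =====
-- one iteration of A's loop body on line `data_split[i]` (none = ValueError on unpacking)
def pvLineStepA (st : Option (PySem.Dict String (List String))) (line : String) :
    Option (PySem.Dict String (List String)) :=
  st.bind fun log =>
    match pySplit line "," with
    | [cookie, timestamp] =>
        let date := (pySplit timestamp "T").headD ""
        some (if log.contains date then log.modify date [] (· ++ [cookie])
              else log.insert date [cookie])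
    | _ => none

def sort_data_as_date_to_cookies (data : String) : List (String × List String) :=
  let data_split := pySplit data "\n"
  let log := (PySem.List.pyRange 1 (PySem.List.len data_split)).foldl
      (fun st i => pvLineStepA st (PySem.List.pyGetD data_split i ""))
      (some PySem.Dict.empty)
  (log.getD PySem.Dict.empty).items

-- ===== PORT B =====
-- the unpacking `(timestamp.split("T")[0], cookie) for cookie, timestamp in row` (none = ValueError)
def pvParseRow (r : List String) : Option (String × String) :=
  match r with
  | [cookie, timestamp] => some ((pySplit timestamp "T").headD "", cookie)
  | _ => none

def sort_data_as_date_to_cookies_alt (data : String) : List (String × List String) :=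
  let rows := ((pySplit data "\n").drop 1).map (fun line => pySplit line ",")
  match rows.mapM pvParseRow with
  | none => []
  | some pairs =>
      let dates := PySem.List.dedup (pairs.map (·.1))
      dates.map (fun date => (date, (pairs.filter (fun p => p.1 == date)).map (·.2)))

-- ===== PRECONDITION & SPEC =====
-- A raises ValueError when some non-header line does not split on "," into exactly two
-- fields; exactly those inputs are excluded.
def Pre_sort_data_as_date_to_cookies (data : String) : Prop :=
  ∀ line ∈ (pySplit data "\n").drop 1, (pySplit line ",").length = 2
instance (data : String) : Decidable (Pre_sort_data_as_date_to_cookies data) := by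
  unfold Pre_sort_data_as_date_to_cookies; infer_instance
def pvWitness_sort_data_as_date_to_cookies : String := "cookie,timestamp\na,2018-12-09T14:19"

def Spec_sort_data_as_date_to_cookies (data : String) (out : List (String × List String)) : Prop :=
  out = sort_data_as_date_to_cookies_alt data
instance (data : String) (out : List (String × List String)) :
    Decidable (Spec_sort_data_as_date_to_cookies data out) := by
  unfold Spec_sort_data_as_date_to_cookies; infer_instance

-- ===== CLAIM (what is proved, stated in full; the proofs are below) =====
def Claim_equal_sort_data_as_date_to_cookies : Prop :=
  ∀ (data : String), Dom_sort_data_as_date_to_cookies data →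
    Pre_sort_data_as_date_to_cookies data →
    Spec_sort_data_as_date_to_cookies data (sort_data_as_date_to_cookies data)

-- ===== LEMMAS AND PROOFS =====

-- (date, cookie) extracted from a well-formed line (proof-side description of both parses)
def pvParseLine (line : String) : String × String :=
  match pySplit line "," with
  | [cookie, timestamp] => ((pySplit timestamp "T").headD "", cookie)
  | _ => ("", "")

def pvDictStep (d : PySem.Dict String (List String)) (p : String × String) :
    PySem.Dict String (List String) :=
  if d.contains p.1 then d.modify p.1 [] (· ++ [p.2]) else d.insert p.1 [p.2]

lemma pvLen2 {α : Type} {xs : List α} (h : xs.length = 2) : ∃ a b, xs = [a, b] := by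
  match xs with
  | [a, b] => exact ⟨a, b, rfl⟩
  | [] | [_] | _ :: _ :: _ :: _ => simp at h

lemma pvDictStep_eq_modify (d : PySem.Dict String (List String)) (p : String × String) :
    pvDictStep d p = d.modify p.1 [] (· ++ [p.2]) := by
  unfold pvDictStep
  split_ifs with h
  · rfl
  · have h' : d.contains p.1 = false := by simpa using h
    rw [PySem.Dict.modify, PySem.Dict.getD_of_not_contains]
    · simp
    · exact h'

lemma pvFoldA_eq (lines : List String)
    (h : ∀ l ∈ lines, (pySplit l ",").length = 2) (d : PySem.Dict String (List String)) :
    lines.foldl pvLineStepA (some d) = some (lines.foldl (fun d l => pvDictStep d (pvParseLine l)) d) := by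
  induction lines generalizing d with
  | nil => rfl
  | cons l ls ih =>
    obtain ⟨c, t, hct⟩ := pvLen2 (h l (by simp))
    have hstep : pvLineStepA (some d) l = some (pvDictStep d (pvParseLine l)) := by
      simp [pvLineStepA, pvParseLine, hct, pvDictStep]
    simp only [List.foldl_cons, hstep]
    exact ih (fun x hx => h x (by simp [hx])) _

lemma pvMapMB_eq (lines : List String)
    (h : ∀ l ∈ lines, (pySplit l ",").length = 2) :
    (lines.map (fun line => pySplit line ",")).mapM pvParseRow = some (lines.map pvParseLine) := by
  induction lines with
  | nil => rfl
  | cons l ls ih =>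
    obtain ⟨c, t, hct⟩ := pvLen2 (h l (by simp))
    have hrow : pvParseRow (pySplit l ",") = some (pvParseLine l) := by
      simp [pvParseRow, pvParseLine, hct]
    simp [List.mapM_cons, hrow, ih (fun x hx => h x (by simp [hx]))]

lemma pvGroup_eq (ps : List (String × String)) :
    (ps.foldl (fun d p => pvDictStep d p) PySem.Dict.empty).items
      = (PySem.List.dedup (ps.map (·.1))).map
          (fun date => (date, (ps.filter (fun p => p.1 == date)).map (·.2))) := by
  have hstep : (fun d p => pvDictStep d p)
      = (fun (d : PySem.Dict String (List String)) (p : String × String) =>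
          d.modify p.1 [] (· ++ [p.2])) := by
    funext d p; exact pvDictStep_eq_modify d p
  rw [hstep]
  have hnd : (ps.foldl (fun d p => d.modify p.1 [] (· ++ [p.2])) PySem.Dict.empty).keys.Nodup :=
    PySem.Dict.nodup_keys_foldl_modify_key ps (·.1) [] (fun _ p => (· ++ [p.2]))
      PySem.Dict.empty (by simp)
  rw [PySem.Dict.items_eq_map_keys _ hnd []]
  have hkeys : (ps.foldl (fun d p => d.modify p.1 [] (· ++ [p.2])) PySem.Dict.empty).keys
      = PySem.List.dedup (ps.map (·.1)) := by
    rw [PySem.Dict.keys_foldl_modify_key ps (·.1) [] (fun _ p => (· ++ [p.2]))]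
    simp [PySem.Dict.keys_empty, PySem.Set.update_nil_left, PySem.List.dedup_eq_ofList]
  rw [hkeys]
  refine List.map_congr_left (fun date _ => ?_)
  rw [PySem.Dict.getD_foldl_modify_append ps PySem.Dict.empty date]
  simp [PySem.Dict.getD_empty]

-- ===== VERDICT (by name: the statement is the Claim_ definition above) =====
theorem sort_data_as_date_to_cookies_spec : Claim_equal_sort_data_as_date_to_cookies := by
  intro data _ hpre
  unfold Spec_sort_data_as_date_to_cookies
  unfold sort_data_as_date_to_cookies sort_data_as_date_to_cookies_alt
  dsimp only
  rw [PySem.List.foldl_pyRange_pyGetD (pySplit data "\n") "" pvLineStepA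
    (some PySem.Dict.empty) (by norm_num)]
  simp only [Int.toNat_one]
  rw [pvFoldA_eq _ hpre, pvMapMB_eq _ hpre]
  simp only [Option.getD_some]
  rw [← List.foldl_map (f := pvParseLine) (g := pvDictStep)]
  exact pvGroup_eq _
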